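-- pv_equiv track=rewrite | github.com/MrBrantCode/unitest_baseline | mut_generate/mist_train_cf/cf_7370/solution.py | generate_prime_matrix
-- ===== SOURCE A (Python) =====
-- def is_prime(num):
--     if num < 2:
--         return False
--     for i in range(2, int(num**0.5) + 1):
--         if num % i == 0:
--             return False
--     return True
--
-- def generate_prime_matrix(n, m):
--     count = 0
--     primes = []
--     num = 1
--     while len(primes) < n * m:
--         if is_prime(num):
--             primes.append(num)
--             count += 1
--         num += 1
--     prime_matrix = [primes[i:i+m] for i in range(0, len(primes), m)]
--     return prime_matrix
-- ===== SOURCE B (Python) =====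
-- def generate_prime_matrix(n, m):
--     total = n * m
--     if m <= 0 or total <= 0:
--         return []
--     # grow a sieve of Eratosthenes until it holds enough primes;
--     # total * bit_length(total) overshoots the total-th prime, so one pass normally suffices
--     # first-pass estimate (capped so the first sieve allocation stays modest)
--     bound = max(16, min(total * total.bit_length(), 1 << 24))
--     while True:
--         sieve = [True] * (bound + 1)
--         sieve[0] = sieve[1] = False
--         p = 2
--         while p * p <= bound:
--             for q in range(p * p, bound + 1, p):
--                 sieve[q] = False
--             p += 1
--         primes = [i for i in range(bound + 1) if sieve[i]]
--         if len(primes) >= total: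
--             break
--         bound *= 2
--     it = iter(primes[:total])
--     return [[next(it) for _ in range(m)] for _ in range(n)]
-- ===== Notes on version B (the rewrite author's own statement) =====
-- stated objective: faster
-- what changed: A tests each candidate number one at a time by trial division up to its square root and slices the result list by ranges; B builds a sieve of Eratosthenes over a doubling bound and splits the first n*m primes into n rows of m.
import Mathlib
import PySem

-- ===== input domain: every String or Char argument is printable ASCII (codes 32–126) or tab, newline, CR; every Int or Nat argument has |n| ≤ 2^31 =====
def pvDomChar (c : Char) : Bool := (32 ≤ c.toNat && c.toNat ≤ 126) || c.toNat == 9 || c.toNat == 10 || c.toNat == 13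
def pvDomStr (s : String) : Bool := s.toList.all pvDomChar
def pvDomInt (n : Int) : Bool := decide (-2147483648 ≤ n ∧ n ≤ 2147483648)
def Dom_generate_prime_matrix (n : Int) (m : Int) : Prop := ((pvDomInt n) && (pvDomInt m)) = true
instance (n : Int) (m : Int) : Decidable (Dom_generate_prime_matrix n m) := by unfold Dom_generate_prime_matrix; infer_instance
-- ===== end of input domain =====

-- B replaces A's one-prime-at-a-time trial division (O(t·√p) divisions for t primes) by a growing
-- sieve of Eratosthenes plus a direct split into rows; measurably faster on large matrices.

-- ===== PORT A =====
-- is_prime: `int(num**0.5)` is ported as Int.sqrt, exact at every magnitude a terminating run reaches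
def isPrimeA (num : Int) : Bool :=
  if num < 2 then false
  else (PySem.List.pyRange 2 (Int.sqrt num + 1) 1).all fun i => !(PySem.Int.mod num i == 0)

-- the `while len(primes) < n*m` loop; fuel only bounds the iteration count (it never runs out:
-- 2^t + 2 candidate numbers always contain t primes — proved below), state is A's (count, primes, num)
def loopA (fuel : Nat) (target count : Int) (primes : List Int) (num : Int) : List Int :=
  if (primes.length : Int) < target then
    match fuel with
    | 0 => primes
    | f + 1 =>
      if isPrimeA num then loopA f target (count + 1) (primes ++ [num]) (num + 1)
      else loopA f target count primes (num + 1)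
  else primes

def generate_prime_matrix (n : Int) (m : Int) : List (List Int) :=
  let primes := loopA (2 ^ (n * m).toNat + 2) (n * m) 0 [] 1
  (PySem.List.pyRange 0 (primes.length : Int) m).map fun i =>
    PySem.List.slice primes (some i) (some (i + m))

-- ===== PORT B =====
-- `for q in range(p*p, bound+1, p): sieve[q] = False` (the 0 < p conjunct is only a termination guard)
def markMultiples (sieve : List Bool) (bound q p : Nat) : List Bool :=
  if h : q ≤ bound ∧ 0 < p then markMultiples (sieve.set q false) bound (q + p) p
  else sieve
termination_by bound + 1 - q
decreasing_by omega

-- `while p*p <= bound: …; p += 1`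
def outerMark (sieve : List Bool) (bound p : Nat) : List Bool :=
  if h : p * p ≤ bound then outerMark (markMultiples sieve bound (p * p) p) bound (p + 1)
  else sieve
termination_by bound + 2 - p
decreasing_by
  rcases Nat.eq_zero_or_pos p with h0 | h0
  · omega
  · have := Nat.le_mul_of_pos_left p h0; omega

-- one sieve pass up to `bound`, returning the primes it finds (as Int)
def sieveList (bound : Nat) : List Int :=
  let s0 := ((List.replicate (bound + 1) true).set 0 false).set 1 false
  let s := outerMark s0 bound 2
  ((List.range (bound + 1)).filter fun i => s.getD i false).map fun i => Int.ofNat i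

-- `while True: … if len(primes) >= total: break; bound *= 2` (fuel = total doublings always suffice)
-- B's starting bound max(16, min(total*total.bit_length(), 1 << 24)) uses PySem.Int.bitLength
def growLoop (fuel total bound : Nat) : List Int :=
  let primes := sieveList bound
  if total ≤ primes.length then primes
  else
    match fuel with
    | 0 => primes
    | f + 1 => growLoop f total (bound * 2)

-- `[[next(it) for _ in range(m)] for _ in range(n)]`: n rows of m consecutive primes
def chunkRows (rows m : Nat) (xs : List Int) : List (List Int) :=
  match rows with
  | 0 => []
  | r + 1 => xs.take m :: chunkRows r m (xs.drop m)

def generate_prime_matrix_alt (n : Int) (m : Int) : List (List Int) :=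
  if m ≤ 0 ∨ n * m ≤ 0 then []
  else
    let t := (n * m).toNat
    chunkRows n.toNat m.toNat
      ((growLoop t t (max 16 (min (t * PySem.Int.bitLength (t : Int)) 16777216))).take t)

-- ===== PRECONDITION & SPEC =====
-- Pre_ excludes only m = 0, where A's final `range(0, 0, 0)` raises ValueError (B returns []).
def Pre_generate_prime_matrix (n : Int) (m : Int) : Prop := m ≠ 0
instance (n : Int) (m : Int) : Decidable (Pre_generate_prime_matrix n m) := by
  unfold Pre_generate_prime_matrix; infer_instance

def pvWitness_generate_prime_matrix : Int × Int := (2, 3)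

def Spec_generate_prime_matrix (n : Int) (m : Int) (out : List (List Int)) : Prop :=
  out = generate_prime_matrix_alt n m
instance (n : Int) (m : Int) (out : List (List Int)) : Decidable (Spec_generate_prime_matrix n m out) := by
  unfold Spec_generate_prime_matrix; infer_instance

-- ===== CLAIM (what is proved, stated in full; the proofs are below) =====
def Claim_equal_generate_prime_matrix : Prop := ∀ (n : Int) (m : Int), Dom_generate_prime_matrix n m → Pre_generate_prime_matrix n m → Spec_generate_prime_matrix n m (generate_prime_matrix n m)

-- ===== LEMMAS AND PROOFS =====

/-- The primes below `N`, as integers, in increasing order. -/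
def intPrimes (N : Nat) : List Int :=
  ((List.range N).filter fun i => decide (Nat.Prime i)).map (Nat.cast : Nat → Int)

/-- The primes among `a, a+1, …, a+f-1`, filtered by A's own primality test. -/
def seg (a f : Nat) : List Int :=
  ((List.range f).map fun k => ((a + k : Nat) : Int)).filter isPrimeA

lemma isPrimeA_natCast (i : Nat) : isPrimeA (i : Int) = decide (Nat.Prime i) := by
  unfold isPrimeA
  by_cases h2 : i < 2
  · rw [if_pos (by exact_mod_cast h2)]
    symm
    simp only [decide_eq_false_iff_not]
    exact fun hp => absurd hp.two_le (by omega)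
  · rw [if_neg (by exact_mod_cast h2), Int.sqrt_natCast]
    by_cases hp : Nat.Prime i
    · simp only [hp, decide_true]
      rw [List.all_eq_true]
      intro d hd
      rw [PySem.List.mem_pyRange_one] at hd
      obtain ⟨hd2, hdlt⟩ := hd
      simp only [Bool.not_eq_eq_eq_not, Bool.not_true, beq_eq_false_iff_ne, ne_eq]
      intro hmod
      rw [PySem.Int.mod_eq_zero_iff_dvd] at hmod
      have hdn : d = ((d.toNat : Nat) : Int) := (Int.toNat_of_nonneg (by omega)).symm
      rw [hdn, Int.natCast_dvd_natCast] at hmod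
      exact (Nat.prime_def_le_sqrt.mp hp).2 d.toNat (by omega) (by omega) hmod
    · simp only [hp, decide_false]
      have hex : ∃ d, 2 ≤ d ∧ d ≤ Nat.sqrt i ∧ d ∣ i := by
        by_contra hno
        push Not at hno
        exact hp (Nat.prime_def_le_sqrt.mpr ⟨by omega, fun d h1 h2 => hno d h1 h2⟩)
      obtain ⟨d, hd2, hds, hdvd⟩ := hex
      rw [List.all_eq_false]
      refine ⟨(d : Int), ?_, ?_⟩
      · rw [PySem.List.mem_pyRange_one]
        constructor
        · exact_mod_cast hd2
        · exact_mod_cast Nat.lt_succ_of_le hds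
      · simp only [Bool.not_eq_eq_eq_not, Bool.not_true, beq_eq_false_iff_ne, ne_eq, not_not]
        rw [PySem.Int.mod_eq_zero_iff_dvd]
        exact_mod_cast hdvd

lemma intPrimes_prefix {M N : Nat} (h : M ≤ N) :
    ∃ rest, intPrimes N = intPrimes M ++ rest := by
  refine ⟨(((List.range (N - M)).map fun x => M + x).filter fun i =>
    decide (Nat.Prime i)).map (Nat.cast : Nat → Int), ?_⟩
  unfold intPrimes
  rw [show N = M + (N - M) by omega, List.range_add, List.filter_append, List.map_append]
  rw [Nat.add_sub_cancel_left]

lemma intPrimes_length_mono {M N : Nat} (h : M ≤ N) :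
    (intPrimes M).length ≤ (intPrimes N).length := by
  obtain ⟨rest, hr⟩ := intPrimes_prefix h
  rw [hr, List.length_append]
  omega

lemma take_intPrimes_eq {t M N : Nat} (hM : t ≤ (intPrimes M).length)
    (hN : t ≤ (intPrimes N).length) :
    (intPrimes M).take t = (intPrimes N).take t := by
  rcases le_total M N with hle | hle
  · obtain ⟨rest, hr⟩ := intPrimes_prefix hle
    rw [hr, List.take_append_of_le_length hM]
  · obtain ⟨rest, hr⟩ := intPrimes_prefix hle
    rw [hr, List.take_append_of_le_length hN]

lemma primes_le_two_pow (k : Nat) : k ≤ (intPrimes (2 ^ k + 1)).length := by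
  induction k with
  | zero => exact Nat.zero_le _
  | succ k ih =>
    obtain ⟨p, hp, hgt, hle⟩ :=
      Nat.exists_prime_lt_and_le_two_mul (2 ^ k) (by positivity)
    obtain ⟨rest, hr⟩ := intPrimes_prefix
      (show 2 ^ k + 1 ≤ 2 ^ (k + 1) + 1 by
        have : 2 ^ k ≤ 2 ^ (k + 1) := Nat.pow_le_pow_right (by omega) (by omega)
        omega)
    have hmem : (p : Int) ∈ intPrimes (2 ^ (k + 1) + 1) := by
      simp only [intPrimes, List.mem_map, List.mem_filter, List.mem_range]
      exact ⟨p, ⟨by rw [pow_succ]; omega, by simp [hp]⟩, rfl⟩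
    have hnot : (p : Int) ∉ intPrimes (2 ^ k + 1) := by
      simp only [intPrimes, List.mem_map, List.mem_filter, List.mem_range]
      rintro ⟨j, ⟨hj, -⟩, hcast⟩
      have : j = p := by exact_mod_cast hcast
      omega
    rw [hr] at hmem
    rcases List.mem_append.mp hmem with hmm | hmm
    · exact absurd hmm hnot
    · have h1 : 1 ≤ rest.length := List.length_pos_of_mem hmm
      have := List.length_append (as := intPrimes (2 ^ k + 1)) (bs := rest)
      rw [hr, this]
      omega

lemma seg_eq_intPrimes (f : Nat) : seg 1 f = intPrimes (f + 1) := by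
  unfold seg intPrimes
  rw [List.range_succ_eq_map]
  rw [show (List.filter (fun i => decide (Nat.Prime i))
        (0 :: List.map Nat.succ (List.range f)))
      = List.filter (fun i => decide (Nat.Prime i)) (List.map Nat.succ (List.range f)) by
    simp [Nat.not_prime_zero]]
  rw [List.filter_map, List.filter_map, List.map_map]
  congr 1
  · funext k
    simp [Nat.succ_eq_add_one, Nat.add_comm]
  · apply List.filter_congr
    intro k _
    simp only [Function.comp_apply, isPrimeA_natCast, Nat.succ_eq_add_one]
    rw [Nat.add_comm]

lemma seg_succ (a f : Nat) :
    seg a (f + 1) = (if isPrimeA (a : Int) then [(a : Int)] else []) ++ seg (a + 1) f := by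
  unfold seg
  rw [List.range_succ_eq_map, List.map_cons, List.map_map, List.filter_cons]
  have hfa : ((fun k => ((a + k : Nat) : Int)) ∘ Nat.succ) =
      fun k => (((a + 1) + k : Nat) : Int) := by
    funext k
    simp only [Function.comp_apply, Nat.succ_eq_add_one]
    congr 1
    omega
  rw [Nat.add_zero, hfa]
  split_ifs <;> simp

lemma loopA_eq (f : Nat) : ∀ (target count : Int) (primes : List Int) (a : Nat),
    target ≤ primes.length + (seg a f).length →
    loopA f target count primes (a : Int) =
      primes ++ (seg a f).take (target - primes.length).toNat := by
  induction f with
  | zero =>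
    intro target count primes a h
    unfold loopA
    have hseg : seg a 0 = [] := rfl
    rw [hseg] at h ⊢
    simp only [List.length_nil, Nat.cast_zero, add_zero] at h
    rw [if_neg (by omega)]
    simp
  | succ f ih =>
    intro target count primes a h
    rw [seg_succ] at h ⊢
    by_cases hlt : (primes.length : Int) < target
    · show loopA (f + 1) target count primes (a : Int) = _
      unfold loopA
      rw [if_pos hlt]
      have hcast : ((a : Int) + 1) = ((a + 1 : Nat) : Int) := by push_cast; ring
      by_cases hpa : isPrimeA (a : Int)
      · simp only [hpa, if_true, if_pos]
        rw [hcast, ih target (count + 1) (primes ++ [(a : Int)]) (a + 1)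
          (by simp only [List.length_append, List.length_cons, List.length_nil]; push_cast
              simp only [hpa, if_true, List.length_append, List.length_cons,
                List.length_nil] at h
              push_cast at h
              omega)]
        simp only [hpa, if_true, List.singleton_append]
        have ht : (target - (primes.length : Int)).toNat =
            ((target - ((primes ++ [(a : Int)]).length : Int)).toNat) + 1 := by
          simp only [List.length_append, List.length_cons, List.length_nil]
          omega
        rw [ht, List.take_succ_cons, List.append_assoc, List.singleton_append]
      · rw [if_neg hpa, List.nil_append] at h
        simp only [hpa, if_false]
        rw [hcast, ih target count primes (a + 1) h]
        simp
    · show loopA (f + 1) target count primes (a : Int) = _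
      unfold loopA
      rw [if_neg hlt]
      have : (target - (primes.length : Int)).toNat = 0 := by omega
      rw [this]
      simp

lemma mark_length (sieve : List Bool) (bound q p : Nat) :
    (markMultiples sieve bound q p).length = sieve.length := by
  fun_induction markMultiples <;> simp_all

lemma mark_get (sieve : List Bool) (bound q p : Nat) : ∀ (i : Nat), 0 < p →
    i < sieve.length →
    (markMultiples sieve bound q p)[i]? =
      if (∃ k, k ≤ i ∧ i = q + k * p) ∧ i ≤ bound then some false else sieve[i]? := by
  fun_induction markMultiples sieve bound q p with
  | case1 sieve q h ih =>
    intro i hp hi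
    rw [ih i hp (by simpa using hi)]
    by_cases hiq : i = q
    · rw [if_neg (show ¬((∃ k, k ≤ i ∧ i = q + p + k * p) ∧ i ≤ bound) from by
        rintro ⟨⟨k, hk, hik⟩, -⟩
        omega)]
      rw [List.getElem?_set, if_pos hiq.symm, if_pos (by omega),
        if_pos ⟨⟨0, by omega⟩, by omega⟩]
    · have hiff : ((∃ k, k ≤ i ∧ i = q + p + k * p) ∧ i ≤ bound) ↔
          ((∃ k, k ≤ i ∧ i = q + k * p) ∧ i ≤ bound) := by
        constructor
        · rintro ⟨⟨k, hk, hik⟩, hb⟩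
          refine ⟨⟨k + 1, ?_, ?_⟩, hb⟩
          · have : k ≤ k * p := Nat.le_mul_of_pos_right k hp
            omega
          · rw [Nat.succ_mul]; omega
        · rintro ⟨⟨k, hk, hik⟩, hb⟩
          match k with
          | 0 => exact absurd (by omega : i = q) hiq
          | k' + 1 =>
            refine ⟨⟨k', by omega, ?_⟩, hb⟩
            rw [Nat.succ_mul] at hik
            omega
      simp only [hiff]
      rw [List.getElem?_set, if_neg (show ¬ q = i from fun hqi => hiq hqi.symm)]
  | case2 sieve q h =>
    intro i hp hi
    rw [if_neg (by
      rintro ⟨⟨k, hk, hik⟩, hb⟩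
      have : ¬ q ≤ bound := fun hq => h ⟨hq, hp⟩
      omega)]

lemma outer_get (sieve : List Bool) (bound p : Nat) : ∀ (i : Nat), 2 ≤ p →
    i < sieve.length →
    (outerMark sieve bound p)[i]? =
      if (∃ d, d ≤ bound ∧ p ≤ d ∧ d * d ≤ bound ∧ d ∣ i ∧ d * d ≤ i ∧ i ≤ bound)
      then some false else sieve[i]? := by
  fun_induction outerMark sieve bound p with
  | case1 sieve p h ih =>
    intro i hp hi
    rw [ih i (by omega) (by rw [mark_length]; exact hi)]
    rw [mark_get sieve bound (p * p) p i (by omega) hi]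
    have hpb : p ≤ bound := le_trans (Nat.le_mul_of_pos_right p (by omega)) h
    by_cases hmc : (∃ k, k ≤ i ∧ i = p * p + k * p) ∧ i ≤ bound
    · have hcond : ∃ d, d ≤ bound ∧ p ≤ d ∧ d * d ≤ bound ∧ d ∣ i ∧ d * d ≤ i ∧ i ≤ bound := by
        obtain ⟨⟨k, hk, hik⟩, hb⟩ := hmc
        exact ⟨p, hpb, le_refl p, h, ⟨p + k, by rw [hik]; ring⟩, by omega, hb⟩
      rw [if_pos hmc, if_pos hcond, ite_self]
    · rw [if_neg hmc]
      by_cases hbn : ∃ d, d ≤ bound ∧ p + 1 ≤ d ∧ d * d ≤ bound ∧ d ∣ i ∧ d * d ≤ i ∧ i ≤ bound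
      · have hcond : ∃ d, d ≤ bound ∧ p ≤ d ∧ d * d ≤ bound ∧ d ∣ i ∧ d * d ≤ i ∧ i ≤ bound := by
          obtain ⟨d, h1, h2, h3, h4, h5, h6⟩ := hbn
          exact ⟨d, h1, by omega, h3, h4, h5, h6⟩
        rw [if_pos hbn, if_pos hcond]
      · have hcond : ¬ ∃ d, d ≤ bound ∧ p ≤ d ∧ d * d ≤ bound ∧ d ∣ i ∧ d * d ≤ i ∧ i ≤ bound := by
          rintro ⟨d, h1, h2, h3, h4, h5, h6⟩
          rcases Nat.lt_or_ge p d with hlt | hge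
          · exact hbn ⟨d, h1, by omega, h3, h4, h5, h6⟩
          · have hdp : d = p := by omega
            subst hdp
            obtain ⟨c, hc⟩ := h4
            refine hmc ⟨⟨c - d, ?_, ?_⟩, h6⟩
            · have hcd : c ≤ d * c := Nat.le_mul_of_pos_left c (by omega)
              omega
            · have hddc : d * d ≤ d * c := by rw [← hc]; exact h5
              have hcd : d ≤ c := Nat.le_of_mul_le_mul_left hddc (by omega)
              calc i = d * c := hc
                _ = d * d + (c - d) * d := by
                    rw [Nat.sub_mul]
                    have h1 : d * d ≤ c * d := Nat.mul_le_mul_right d hcd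
                    rw [Nat.mul_comm d c]
                    omega
        rw [if_neg hbn, if_neg hcond]
  | case2 sieve p h =>
    intro i hp hi
    rw [if_neg (by
      rintro ⟨d, h1, h2, h3, h4, h5, h6⟩
      exact h (le_trans (Nat.mul_le_mul h2 h2) h3))]

lemma sieve_get (bound i : Nat) (hi : i ≤ bound) :
    (outerMark (((List.replicate (bound + 1) true).set 0 false).set 1 false) bound 2)[i]? =
      some (decide (Nat.Prime i)) := by
  have hlen : (((List.replicate (bound + 1) true).set 0 false).set 1 false).length = bound + 1 := by
    simp
  rw [outer_get _ bound 2 i (le_refl 2) (by omega)]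
  have hbase : (((List.replicate (bound + 1) true).set 0 false).set 1 false)[i]? =
      some (decide (2 ≤ i)) := by
    rw [List.getElem?_set, List.getElem?_set]
    rcases Nat.lt_or_ge i 2 with h2 | h2
    · interval_cases i <;> simp <;> omega
    · rw [if_neg (by omega), if_neg (by omega), List.getElem?_replicate, if_pos (by omega)]
      simp [h2]
  by_cases hc : ∃ d, d ≤ bound ∧ 2 ≤ d ∧ d * d ≤ bound ∧ d ∣ i ∧ d * d ≤ i ∧ i ≤ bound
  · rw [if_pos hc]
    obtain ⟨d, h1, h2, h3, h4, h5, h6⟩ := hc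
    have hprime : ¬ Nat.Prime i := by
      intro hp
      have hd_le_sqrt : d ≤ Nat.sqrt i := Nat.le_sqrt.mpr h5
      exact (Nat.prime_def_le_sqrt.mp hp).2 d h2 hd_le_sqrt h4
    rw [decide_eq_false hprime]
  · rw [if_neg hc, hbase]
    rcases Nat.lt_or_ge i 2 with h2 | h2
    · have hnp : ¬ Nat.Prime i := by interval_cases i <;> decide
      rw [decide_eq_false hnp, decide_eq_false (show ¬ 2 ≤ i by omega)]
    · have hp : Nat.Prime i := by
        by_contra hnp
        have hex : ∃ d, 2 ≤ d ∧ d ≤ Nat.sqrt i ∧ d ∣ i := by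
          by_contra hno
          push Not at hno
          exact hnp (Nat.prime_def_le_sqrt.mpr ⟨h2, fun d hd1 hd2 => hno d hd1 hd2⟩)
        obtain ⟨d, hd1, hd2, hd3⟩ := hex
        have hs : Nat.sqrt i * Nat.sqrt i ≤ i := by
          have := Nat.sqrt_le' i
          rwa [pow_two] at this
        have hdd : d * d ≤ i := le_trans (Nat.mul_le_mul hd2 hd2) hs
        have hdsq : d ≤ d * d := Nat.le_mul_of_pos_left d (by omega)
        exact hc ⟨d, by omega, hd1, by omega, hd3, hdd, hi⟩
      rw [decide_eq_true hp, decide_eq_true (show 2 ≤ i from h2)]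

lemma sieveList_eq (bound : Nat) : sieveList bound = intPrimes (bound + 1) := by
  have hcong : ((List.range (bound + 1)).filter fun i =>
      (outerMark (((List.replicate (bound + 1) true).set 0 false).set 1 false)
        bound 2).getD i false)
      = (List.range (bound + 1)).filter fun i => decide (Nat.Prime i) := by
    apply List.filter_congr
    intro i hi
    rw [List.mem_range] at hi
    rw [List.getD_eq_getElem?_getD, sieve_get bound i (by omega)]
    rfl
  show ((List.range (bound + 1)).filter fun i =>
      (outerMark (((List.replicate (bound + 1) true).set 0 false).set 1 false)
        bound 2).getD i false).map (fun i => Int.ofNat i) = _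
  rw [hcong]
  rfl

lemma growLoop_spec (fuel : Nat) : ∀ (total bound : Nat),
    total ≤ (intPrimes (bound * 2 ^ fuel + 1)).length →
    ∃ b, growLoop fuel total bound = intPrimes (b + 1) ∧
      total ≤ (intPrimes (b + 1)).length := by
  induction fuel with
  | zero =>
    intro total bound h
    rw [pow_zero, mul_one] at h
    refine ⟨bound, ?_, h⟩
    simp only [growLoop]
    rw [sieveList_eq]
    split <;> rfl
  | succ f ih =>
    intro total bound h
    by_cases hc : total ≤ (sieveList bound).length
    · refine ⟨bound, ?_, by rwa [sieveList_eq] at hc⟩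
      simp only [growLoop]
      rw [if_pos hc, sieveList_eq]
    · have hstep : total ≤ (intPrimes (bound * 2 * 2 ^ f + 1)).length := by
        rw [show bound * 2 * 2 ^ f = bound * 2 ^ (f + 1) by ring]
        exact h
      obtain ⟨b, hb1, hb2⟩ := ih total (bound * 2) hstep
      refine ⟨b, ?_, hb2⟩
      simp only [growLoop]
      rw [if_neg hc]
      exact hb1

lemma pyRange_mul (N m : Nat) (hm : 0 < m) :
    PySem.List.pyRange 0 ((N : Int) * m) (m : Int) =
      (List.range N).map fun k : Nat => ((m : Int) * (k : Int)) := by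
  rw [PySem.List.pyRange_of_pos 0 ((N : Int) * m) (by exact_mod_cast hm)]
  rcases Nat.eq_zero_or_pos N with rfl | hN
  · simp
  · rw [if_pos (by
      have := Nat.mul_pos hN hm
      exact_mod_cast this)]
    have hdiv : ((N : Int) * m - 0 + m - 1) / m = N := by
      rw [show (N : Int) * m - 0 + m - 1 = (m - 1) + N * m by ring,
        Int.add_mul_ediv_right _ _ (by exact_mod_cast hm.ne' : (m : Int) ≠ 0),
        Int.ediv_eq_zero_of_lt (by omega) (by omega)]
      simp
    rw [hdiv, Int.toNat_natCast]
    apply List.map_congr_left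
    intro k _
    simp

lemma slice_block (m : Nat) (ys : List Int) (k : Nat) :
    PySem.List.slice ys (some ((m : Int) * k)) (some ((m : Int) * k + m)) =
      (ys.drop (m * k)).take m := by
  have h := PySem.List.slice_natCast_add ys (m * k) m
  rw [show (((m * k : Nat)) : Int) = (m : Int) * k by push_cast; ring] at h
  exact h

lemma chunk_eq (N m : Nat) : ∀ (xs : List Int),
    ((List.range N).map fun k : Nat =>
        PySem.List.slice xs (some ((m : Int) * (k : Int)))
          (some ((m : Int) * (k : Int) + m))) =
      chunkRows N m xs := by
  induction N with
  | zero => intro xs; rfl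
  | succ N ih =>
    intro xs
    rw [List.range_succ_eq_map, List.map_cons, List.map_map]
    show _ :: _ = chunkRows (N + 1) m xs
    rw [chunkRows]
    congr 1
    · rw [slice_block]
      rw [Nat.mul_zero, List.drop_zero]
    · rw [← ih (xs.drop m)]
      apply List.map_congr_left
      intro k _
      simp only [Function.comp_apply, Nat.succ_eq_add_one]
      rw [slice_block, slice_block, List.drop_drop]
      congr 2
      rw [Nat.mul_succ]
      omega

-- ===== VERDICT (by name: the statement is the Claim_ definition above) =====
theorem generate_prime_matrix_spec : Claim_equal_generate_prime_matrix := by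
  intro n m _ hpre
  unfold Pre_generate_prime_matrix at hpre
  unfold Spec_generate_prime_matrix
  simp only [generate_prime_matrix, generate_prime_matrix_alt]
  by_cases hm : m ≤ 0
  · -- m < 0: A's final range(0, len(primes), m) is empty and B returns []
    rw [if_pos (Or.inl hm)]
    have hrange : ∀ (xs : List Int), PySem.List.pyRange 0 (xs.length : Int) m = [] := by
      intro xs
      simp only [PySem.List.pyRange]
      rw [if_neg hpre, if_neg (show ¬ (0:Int) < m by omega),
        if_neg (show ¬ ((xs.length : Int) < 0) by omega)]
      simp
    rw [hrange]
    rfl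
  · by_cases hn : n ≤ 0
    · -- n ≤ 0 < m: the loop target n*m is ≤ 0, A collects nothing
      have hm0 : (0:Int) < m := by omega
      have ht : n * m ≤ 0 := by nlinarith
      rw [if_pos (Or.inr ht)]
      have hloop : loopA (2 ^ (n * m).toNat + 2) (n * m) 0 [] 1 = [] := by
        unfold loopA
        rw [if_neg (by simp; omega)]
      rw [hloop]
      simp only [PySem.List.pyRange]
      rw [if_neg hpre, if_pos hm0, if_neg (by simp)]
      simp
    · -- main case: n > 0, m > 0
      have hm0 : (0:Int) < m := by omega
      have hn0 : (0:Int) < n := by omega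
      obtain ⟨N, rfl⟩ : ∃ N : Nat, n = (N : Int) := ⟨n.toNat, (Int.toNat_of_nonneg hn0.le).symm⟩
      obtain ⟨M, rfl⟩ : ∃ M : Nat, m = (M : Int) := ⟨m.toNat, (Int.toNat_of_nonneg hm0.le).symm⟩
      have hMpos : 0 < M := by exact_mod_cast hm0
      have hNpos : 0 < N := by exact_mod_cast hn0
      set t := N * M with htdef
      have htoNat : ((N : Int) * (M : Int)).toNat = t := by
        rw [show ((N : Int) * M) = ((t : Nat) : Int) by rw [htdef]; push_cast; ring,
          Int.toNat_natCast]
      have hsl : seg 1 (2 ^ t + 2) = intPrimes (2 ^ t + 3) := by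
        rw [seg_eq_intPrimes]
      have hlen1 : t ≤ (intPrimes (2 ^ t + 3)).length :=
        le_trans (primes_le_two_pow t) (intPrimes_length_mono (by omega))
      have hA := loopA_eq (2 ^ t + 2) ((N : Int) * M) 0 [] 1 (by
        rw [hsl]
        simp only [List.length_nil, Nat.cast_zero, zero_add]
        calc ((N : Int) * M) = ((t : Nat) : Int) := by rw [htdef]; push_cast; ring
          _ ≤ ((intPrimes (2 ^ t + 3)).length : Int) := by exact_mod_cast hlen1)
      simp only [List.nil_append, List.length_nil, Nat.cast_zero, sub_zero, Nat.cast_one] at hA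
      rw [hsl, htoNat] at hA
      set P := (intPrimes (2 ^ t + 3)).take t with hP
      have hPlen : P.length = t := by rw [hP, List.length_take]; omega
      have hB0 : t ≤
          (intPrimes (max 16 (min (t * PySem.Int.bitLength (t : Int)) 16777216) * 2 ^ t
            + 1)).length :=
        le_trans (primes_le_two_pow t) (intPrimes_length_mono (by
          have h1 : 1 * 2 ^ t ≤
              max 16 (min (t * PySem.Int.bitLength (t : Int)) 16777216) * 2 ^ t :=
            Nat.mul_le_mul_right _ (by omega)
          omega))
      obtain ⟨b, hgrow, hblen⟩ := growLoop_spec t t _ hB0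
      have htake : P = (intPrimes (b + 1)).take t := take_intPrimes_eq hlen1 hblen
      rw [if_neg (by
        push Not
        exact ⟨by exact_mod_cast hMpos, by exact_mod_cast Nat.mul_pos hNpos hMpos⟩)]
      rw [htoNat, hA]
      rw [hPlen, show ((t : Nat) : Int) = (N : Int) * M by rw [htdef]; push_cast; ring,
        pyRange_mul N M hMpos]
      simp only [List.map_map, Function.comp_def]
      rw [show PySem.Int.bitLength ((N : Int) * M) = PySem.Int.bitLength ((t : Nat) : Int) from by
        rw [htdef, Nat.cast_mul]]
      rw [chunk_eq N M P, Int.toNat_natCast, Int.toNat_natCast, hgrow, ← htake]
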